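-- pv_equiv track=rewrite | github.com/masaki-dotcom/B066_YOLO | rest_server/YOLO.py | row_sort_basic
-- ===== SOURCE A (Python) =====
-- def row_sort_basic(centers):
--
--     if not centers:
--         return centers
--
--     ys = [c[1] for c in centers]
--     h = max(ys) - min(ys)
--
--     th = max(10, int(h * 0.03))
--
--     centers = sorted(centers, key=lambda x: x[1])
--
--     rows=[]
--     cur=[centers[0]]
--
--     for c in centers[1:]:
--
--         if abs(c[1]-cur[-1][1]) < th:
--             cur.append(c)
--         else:
--             rows.append(cur)
--             cur=[c]
--
--     rows.append(cur)
--
--     out=[]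
--
--     for r in rows:
--         r=sorted(r,key=lambda x:x[0])
--         out.extend(r)
--
--     return out
-- ===== SOURCE B (Python) =====
-- def row_sort_basic(centers):
--     if not centers:
--         return centers
--
--     ys = sorted(c[1] for c in centers)
--     th = max(10, int((ys[-1] - ys[0]) * 0.03))
--
--     # row label for each distinct y value: bump the label at every gap >= th
--     row_of = {ys[0]: 0}
--     r = 0
--     for prev, y in zip(ys, ys[1:]):
--         if y - prev >= th:
--             r += 1
--         row_of[y] = r
--
--     # radix-style pair of stable sorts: (x, y) first, then row label
--     by_xy = sorted(centers, key=lambda c: (c[0], c[1]))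
--     return sorted(by_xy, key=lambda c: row_of[c[1]])
-- ===== Notes on version B (the rewrite author's own statement) =====
-- stated objective: alternative
-- what changed: B never groups elements into row sublists: it derives a y-value-to-row-label dictionary from the sorted y values alone (bumping the label at each gap >= th), then orders the centers by a radix-style pair of stable sorts, first by (x, y) and then by row label, instead of A's sort-by-y / split-into-rows / sort-each-row-and-concatenate pipeline.
import Mathlib
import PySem

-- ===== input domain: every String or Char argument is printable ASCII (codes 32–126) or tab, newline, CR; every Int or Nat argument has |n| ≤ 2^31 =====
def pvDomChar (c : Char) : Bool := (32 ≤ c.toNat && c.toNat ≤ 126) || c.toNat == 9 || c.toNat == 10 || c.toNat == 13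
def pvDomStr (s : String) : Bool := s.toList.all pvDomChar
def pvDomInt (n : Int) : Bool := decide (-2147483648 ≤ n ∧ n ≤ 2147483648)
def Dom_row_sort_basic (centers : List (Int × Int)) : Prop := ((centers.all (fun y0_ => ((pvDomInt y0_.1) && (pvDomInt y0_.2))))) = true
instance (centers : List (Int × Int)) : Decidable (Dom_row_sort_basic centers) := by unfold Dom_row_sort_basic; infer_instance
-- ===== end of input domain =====

-- B builds a y-value → row-label dictionary from the sorted y values alone and orders the
-- centers by a radix-style pair of stable sorts ((x, y) first, then row label), instead of
-- A's sort-by-y / split-into-row-sublists / sort-each-row-and-concatenate; same cost.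

-- ===== PORT A =====
-- the body of A's grouping for-loop, over state (rows, cur)
def pvStepA (th : Int) (st : List (List (Int × Int)) × List (Int × Int)) (c : Int × Int) :
    List (List (Int × Int)) × List (Int × Int) :=
  if |c.2 - (PySem.List.pyGetD st.2 (-1) (0, 0)).2| < th then (st.1, st.2 ++ [c])
  else (st.1 ++ [st.2], [c])

def row_sort_basic (centers : List (Int × Int)) : List (Int × Int) :=
  if centers = [] then centers
  else
    let ys := centers.map (fun c => c.2)
    let h := ((PySem.List.max? ys (fun y => y)).getD 0) - ((PySem.List.min? ys (fun y => y)).getD 0)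
    -- int(h * 0.03) ported as floor(3*h/100): exact for every 0 ≤ h ≤ 2^32 (h = max-min under Dom),
    -- checked against CPython float semantics at every candidate disagreement point
    let th := max 10 (PySem.Int.floordiv (3 * h) 100)
    let cs := PySem.List.sorted centers (fun x => x.2)
    -- centers[0] (cs is nonempty here), centers[1:]
    let st := (cs.drop 1).foldl (pvStepA th) ([], [cs.headD (0, 0)])
    let rows := st.1 ++ [st.2]
    rows.foldl (fun out r => out ++ PySem.List.sorted r (fun x => x.1)) []

-- ===== PORT B =====
-- the body of B's labelling for-loop over zip(ys, ys[1:]), state (row_of, r)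
def pvStepB (th : Int) (st : PySem.Dict Int Int × Int) (py : Int × Int) : PySem.Dict Int Int × Int :=
  if py.2 - py.1 ≥ th then (st.1.insert py.2 (st.2 + 1), st.2 + 1)
  else (st.1.insert py.2 st.2, st.2)

def row_sort_basic_alt (centers : List (Int × Int)) : List (Int × Int) :=
  if centers = [] then centers
  else
    let ys := PySem.List.sorted (centers.map (fun c => c.2)) (fun y => y)
    -- int((ys[-1]-ys[0]) * 0.03) ported as floor(3*h/100): exact for every 0 ≤ h ≤ 2^32, as in port A
    let th := max 10 (PySem.Int.floordiv (3 * (PySem.List.pyGetD ys (-1) 0 - PySem.List.pyGetD ys 0 0)) 100)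
    let st := (ys.zip (ys.drop 1)).foldl (pvStepB th)
        ((PySem.Dict.empty).insert (PySem.List.pyGetD ys 0 0) 0, 0)
    let byXY := PySem.List.sorted2 centers (fun c => c.1) (fun c => c.2)
    PySem.List.sorted byXY (fun c => st.1.getD c.2 0)

-- ===== PRECONDITION & SPEC =====
def Spec_row_sort_basic (centers : List (Int × Int)) (out : List (Int × Int)) : Prop := out = row_sort_basic_alt centers
instance (centers : List (Int × Int)) (out : List (Int × Int)) : Decidable (Spec_row_sort_basic centers out) := by unfold Spec_row_sort_basic; infer_instance

-- ===== CLAIM (what is proved, stated in full; the proofs are below) =====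
def Claim_equal_row_sort_basic : Prop := ∀ (centers : List (Int × Int)), Dom_row_sort_basic centers → Spec_row_sort_basic centers (row_sort_basic centers)

-- ===== LEMMAS AND PROOFS =====

-- the total preorder both outputs are sorted under: row label first, then x, then y
def pvR (d : PySem.Dict Int Int) (a b : Int × Int) : Prop :=
  d.getD a.2 0 < d.getD b.2 0 ∨
    (d.getD a.2 0 = d.getD b.2 0 ∧ (a.1 < b.1 ∨ (a.1 = b.1 ∧ a.2 ≤ b.2)))

-- two sorted permutations under an antisymmetric-to-equality relation coincide
lemma pv_eq_of_perm_pairwise {α : Type} (R : α → α → Prop)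
    (hanti : ∀ a b, R a b → R b a → a = b) :
    ∀ (l₁ l₂ : List α), l₁.Perm l₂ → l₁.Pairwise R → l₂.Pairwise R → l₁ = l₂ := by
  intro l₁
  induction l₁ with
  | nil => intro l₂ hp _ _; exact hp.nil_eq
  | cons a t ih =>
      intro l₂ hp h₁ h₂
      cases l₂ with
      | nil => exact absurd hp.symm.nil_eq (by simp)
      | cons b t₂ =>
          have hab : a = b := by
            have hb : b ∈ a :: t := hp.symm.mem_iff.mp (by simp)
            have ha : a ∈ b :: t₂ := hp.mem_iff.mp (by simp)
            rcases List.mem_cons.mp hb with h | hbt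
            · exact h.symm
            · rcases List.mem_cons.mp ha with h | hat
              · exact h
              · exact hanti a b (List.rel_of_pairwise_cons h₁ hbt)
                  (List.rel_of_pairwise_cons h₂ hat)
          subst hab
          exact congrArg (a :: ·) (ih t₂ hp.cons_inv h₁.of_cons h₂.of_cons)

-- stability of the insertion step: inserting x after everything G-related to it keeps
-- the (key, tie-break G) order
lemma pv_insertBy_pairwise {α : Type} (k : α → Int) (G : α → α → Prop) (x : α) :
    ∀ (acc : List α),
      acc.Pairwise (fun a b => k a < k b ∨ (k a = k b ∧ G a b)) →
      (∀ z ∈ acc, G z x) →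
      (PySem.List.insertBy (fun a b => decide (k a < k b)) x acc).Pairwise
        (fun a b => k a < k b ∨ (k a = k b ∧ G a b)) := by
  intro acc
  induction acc with
  | nil => intro _ _; simp [PySem.List.insertBy]
  | cons y t ih =>
      intro hacc hx
      by_cases h : k x < k y
      · have : PySem.List.insertBy (fun a b => decide (k a < k b)) x (y :: t) = x :: y :: t := by
          simp [PySem.List.insertBy, h]
        rw [this]
        refine List.Pairwise.cons ?_ hacc
        intro z hz
        rcases List.mem_cons.mp hz with rfl | hzt
        · exact Or.inl h
        · have := List.rel_of_pairwise_cons hacc hzt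
          rcases this with h' | ⟨h', _⟩
          · exact Or.inl (lt_trans h h')
          · exact Or.inl (h' ▸ h)
      · have : PySem.List.insertBy (fun a b => decide (k a < k b)) x (y :: t)
            = y :: PySem.List.insertBy (fun a b => decide (k a < k b)) x t := by
          simp [PySem.List.insertBy, h]
        rw [this]
        refine List.Pairwise.cons ?_ (ih hacc.of_cons (fun z hz => hx z (by simp [hz])))
        intro z hz
        rcases (PySem.List.mem_insertBy _ _ _ _).mp hz with rfl | hzt
        · rcases lt_or_eq_of_le (not_lt.mp h) with h' | h'
          · exact Or.inl h'
          · exact Or.inr ⟨h', hx y (by simp)⟩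
        · exact List.rel_of_pairwise_cons hacc hzt

lemma pv_foldl_insertBy_pairwise {α : Type} (k : α → Int) (G : α → α → Prop) :
    ∀ (l acc : List α),
      acc.Pairwise (fun a b => k a < k b ∨ (k a = k b ∧ G a b)) →
      (∀ x ∈ l, ∀ z ∈ acc, G z x) →
      l.Pairwise G →
      (l.foldl (fun acc x => PySem.List.insertBy (fun a b => decide (k a < k b)) x acc) acc).Pairwise
        (fun a b => k a < k b ∨ (k a = k b ∧ G a b)) := by
  intro l
  induction l with
  | nil => intro acc h _ _; exact h
  | cons x t ih =>
      intro acc hacc hG hl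
      simp only [List.foldl_cons]
      refine ih _ (pv_insertBy_pairwise k G x acc hacc (hG x (by simp))) ?_ hl.of_cons
      intro x' hx' z hz
      rcases (PySem.List.mem_insertBy _ _ _ _).mp hz with rfl | hzt
      · exact List.rel_of_pairwise_cons hl hx'
      · exact hG x' (by simp [hx']) z hzt

-- a stable sort of a G-presorted list is sorted by (key, G) lexicographically
lemma pv_sorted_stable {α : Type} (k : α → Int) (G : α → α → Prop) (l : List α)
    (hl : l.Pairwise G) :
    (PySem.List.sorted l k).Pairwise (fun a b => k a < k b ∨ (k a = k b ∧ G a b)) := by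
  rw [PySem.List.sorted_eq_foldl_insertBy]
  exact pv_foldl_insertBy_pairwise k G l [] (by simp) (by simp) hl

-- sorted2 is sorted with the lexicographic key
lemma pv_sorted2_eq_sorted_lex {α : Type} (l : List α) (k1 k2 : α → Int) :
    PySem.List.sorted2 l k1 k2 = PySem.List.sorted l (fun a => toLex (k1 a, k2 a)) := by
  rw [PySem.List.sorted_eq_foldl_insertBy]
  show l.foldl (fun acc x => PySem.List.insertBy
      (fun a b => decide (k1 a < k1 b) || (!decide (k1 b < k1 a) && decide (k2 a < k2 b))) x acc) [] = _
  congr 1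
  funext acc x
  congr 1
  funext a b
  have : (toLex (k1 a, k2 a) < toLex (k1 b, k2 b)) ↔
      (k1 a < k1 b ∨ (k1 a = k1 b ∧ k2 a < k2 b)) := Prod.Lex.lt_iff
  by_cases h1 : k1 a < k1 b <;> by_cases h2 : k1 b < k1 a <;> by_cases h3 : k2 a < k2 b <;>
    simp [h1, h2, h3, this] <;> omega

-- a flatMap of per-block sorts is a permutation of the flatten
lemma pv_flatMap_sorted_perm (rows : List (List (Int × Int))) :
    (rows.flatMap (fun r => PySem.List.sorted r (fun x => x.1))).Perm rows.flatten := by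
  induction rows with
  | nil => simp
  | cons a t ih =>
      simp only [List.flatMap_cons, List.flatten_cons]
      exact (PySem.List.sorted_perm a (fun x => x.1) false).append ih

-- the joint invariant of A's grouping fold and B's labelling fold
lemma pv_joint_inv (th : Int) (hth : 0 < th) :
    ∀ (rem : List (Int × Int)) (rows : List (List (Int × Int))) (cur : List (Int × Int))
      (prev : Int × Int) (d : PySem.Dict Int Int) (r : Int),
      PySem.List.pyGetD cur (-1) (0, 0) = prev →
      prev ∈ cur →
      (∀ e ∈ cur, e.2 ≤ prev.2) →
      rem.Pairwise (fun a b => a.2 ≤ b.2) →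
      (∀ e ∈ rem, prev.2 ≤ e.2) →
      (∀ e ∈ rows.flatten, e.2 + th ≤ (cur.headD (0, 0)).2) →
      (∀ c ∈ cur, d.getD c.2 0 = r) →
      ((rows ++ [cur]).Pairwise (fun b1 b2 => ∀ a ∈ b1, ∀ c ∈ b2, d.getD a.2 0 < d.getD c.2 0)) →
      (∀ b ∈ rows ++ [cur], ∀ a ∈ b, ∀ c ∈ b, d.getD a.2 0 = d.getD c.2 0) →
      (∀ b ∈ rows ++ [cur], ∀ a ∈ b, d.getD a.2 0 ≤ r) →
      ((((rem.foldl (pvStepA th) (rows, cur)).1 ++ [(rem.foldl (pvStepA th) (rows, cur)).2]).flatten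
          = (rows ++ [cur]).flatten ++ rem)
       ∧ ((rem.foldl (pvStepA th) (rows, cur)).1 ++ [(rem.foldl (pvStepA th) (rows, cur)).2]).Pairwise
            (fun b1 b2 => ∀ a ∈ b1, ∀ c ∈ b2,
              ((((prev :: rem).zip rem).foldl (fun st p => pvStepB th st (p.1.2, p.2.2)) (d, r)).1).getD a.2 0
                < ((((prev :: rem).zip rem).foldl (fun st p => pvStepB th st (p.1.2, p.2.2)) (d, r)).1).getD c.2 0)
       ∧ (∀ b ∈ (rem.foldl (pvStepA th) (rows, cur)).1 ++ [(rem.foldl (pvStepA th) (rows, cur)).2],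
            ∀ a ∈ b, ∀ c ∈ b,
              ((((prev :: rem).zip rem).foldl (fun st p => pvStepB th st (p.1.2, p.2.2)) (d, r)).1).getD a.2 0
                = ((((prev :: rem).zip rem).foldl (fun st p => pvStepB th st (p.1.2, p.2.2)) (d, r)).1).getD c.2 0)) := by
  intro rem
  induction rem with
  | nil =>
      intro rows cur prev d r _ _ _ _ _ _ _ h3b h3c _
      simp only [List.foldl_nil, List.zip_nil_right]
      exact ⟨by simp, h3b, h3c⟩
  | cons c rem' ih =>
      intro rows cur prev d r hprev hmem hbound hsort hge h5 h3a h3b h3c h3d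
      have hcne : cur ≠ [] := List.ne_nil_of_mem hmem
      have hprevc : prev.2 ≤ c.2 := hge c (by simp)
      have hheadmem : (cur.headD (0,0)) ∈ cur := by
        cases cur with
        | nil => exact absurd rfl hcne
        | cons a t => simp
      have hheadle : (cur.headD (0,0)).2 ≤ prev.2 := hbound _ hheadmem
      simp only [List.foldl_cons, List.zip_cons_cons]
      by_cases hg : th ≤ c.2 - prev.2
      · -- c starts a new row
        have hA : pvStepA th (rows, cur) c = (rows ++ [cur], [c]) := by
          simp only [pvStepA, hprev]
          rw [if_neg (by rw [abs_of_nonneg (by omega)]; omega)]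
        have hB : pvStepB th (d, r) (prev.2, c.2) = (d.insert c.2 (r + 1), r + 1) := by
          simp only [pvStepB]
          rw [if_pos (by omega)]
        rw [hA, hB]
        have htrans : ∀ a ∈ (rows ++ [cur]).flatten,
            (d.insert c.2 (r+1)).getD a.2 0 = d.getD a.2 0 := by
          intro a ha
          rw [PySem.Dict.getD_insert]
          simp only [List.flatten_append, List.flatten_cons, List.flatten_nil,
            List.append_nil, List.mem_append] at ha
          rcases ha with ha | ha
          · have := h5 a ha
            rw [if_neg (by omega)]
          · have := hbound a ha
            rw [if_neg (by omega)]
        have h3a' : ∀ e ∈ [c], (d.insert c.2 (r+1)).getD e.2 0 = r + 1 := by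
          intro e he
          simp only [List.mem_singleton] at he
          subst he
          rw [PySem.Dict.getD_insert, if_pos rfl]
        have hres := ih (rows ++ [cur]) [c] c (d.insert c.2 (r+1)) (r+1)
          (by simpa using PySem.List.pyGetD_neg_one_append_singleton [] c (0,0))
          (by simp)
          (by intro e he; simp only [List.mem_singleton] at he; subst he; exact le_refl _)
          hsort.of_cons
          (fun e he => List.rel_of_pairwise_cons hsort he)
          (by
            intro e he
            simp only [List.headD_cons]
            simp only [List.flatten_append, List.flatten_cons, List.flatten_nil,
              List.append_nil, List.mem_append] at he
            rcases he with he | he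
            · have := h5 e he; omega
            · have := hbound e he; omega)
          h3a'
          (by
            rw [List.pairwise_append]
            refine ⟨h3b.imp_of_mem ?_, by simp, ?_⟩
            · intro b1 b2 hb1 hb2 hrel a ha e hc'
              rw [htrans a (List.mem_flatten.mpr ⟨b1, hb1, ha⟩),
                  htrans e (List.mem_flatten.mpr ⟨b2, hb2, hc'⟩)]
              exact hrel a ha e hc'
            · intro b hb bc hbc a ha e he
              simp only [List.mem_singleton] at hbc
              subst hbc
              rw [htrans a (List.mem_flatten.mpr ⟨b, hb, ha⟩), h3a' e he]
              have := h3d b hb a ha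
              omega)
          (by
            intro b hb a ha e he
            rcases List.mem_append.mp hb with hb' | hb'
            · rw [htrans a (List.mem_flatten.mpr ⟨b, hb', ha⟩),
                  htrans e (List.mem_flatten.mpr ⟨b, hb', he⟩)]
              exact h3c b hb' a ha e he
            · simp only [List.mem_singleton] at hb'
              subst hb'
              rw [h3a' a ha, h3a' e he])
          (by
            intro b hb a ha
            rcases List.mem_append.mp hb with hb' | hb'
            · rw [htrans a (List.mem_flatten.mpr ⟨b, hb', ha⟩)]
              have := h3d b hb' a ha
              omega
            · simp only [List.mem_singleton] at hb'
              subst hb'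
              rw [h3a' a ha])
        refine ⟨hres.1.trans (by simp), hres.2.1, hres.2.2⟩
      · -- c stays in the current row
        have hA : pvStepA th (rows, cur) c = (rows, cur ++ [c]) := by
          simp only [pvStepA, hprev]
          rw [if_pos (by rw [abs_of_nonneg (by omega)]; omega)]
        have hB : pvStepB th (d, r) (prev.2, c.2) = (d.insert c.2 r, r) := by
          simp only [pvStepB]
          rw [if_neg (by omega)]
        rw [hA, hB]
        have htrans : ∀ a ∈ (rows ++ [cur]).flatten,
            (d.insert c.2 r).getD a.2 0 = d.getD a.2 0 := by
          intro a ha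
          rw [PySem.Dict.getD_insert]
          simp only [List.flatten_append, List.flatten_cons, List.flatten_nil,
            List.append_nil, List.mem_append] at ha
          rcases ha with ha | ha
          · have := h5 a ha
            rw [if_neg (by omega)]
          · by_cases hq : a.2 = c.2
            · rw [if_pos hq, h3a a ha]
            · rw [if_neg hq]
        have h3a' : ∀ e ∈ cur ++ [c], (d.insert c.2 r).getD e.2 0 = r := by
          intro e he
          rcases List.mem_append.mp he with he' | he'
          · rw [htrans e (List.mem_flatten.mpr ⟨cur, by simp, he'⟩)]
            exact h3a e he'
          · simp only [List.mem_singleton] at he'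
            subst he'
            rw [PySem.Dict.getD_insert, if_pos rfl]
        have hres := ih rows (cur ++ [c]) c (d.insert c.2 r) r
          (PySem.List.pyGetD_neg_one_append_singleton cur c (0,0))
          (by simp)
          (by
            intro e he
            rcases List.mem_append.mp he with he' | he'
            · have := hbound e he'; omega
            · simp only [List.mem_singleton] at he'; subst he'; exact le_refl _)
          hsort.of_cons
          (fun e he => List.rel_of_pairwise_cons hsort he)
          (by
            intro e he
            have hh : ((cur ++ [c]).headD (0,0)) = cur.headD (0,0) := by
              cases cur with
              | nil => exact absurd rfl hcne
              | cons a t => simp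
            rw [hh]
            exact h5 e he)
          h3a'
          (by
            rw [List.pairwise_append] at h3b ⊢
            obtain ⟨hrows, -, hcross⟩ := h3b
            refine ⟨hrows.imp_of_mem ?_, by simp, ?_⟩
            · intro b1 b2 hb1 hb2 hrel a ha e hc'
              rw [htrans a (List.mem_flatten.mpr ⟨b1, by simp [hb1], ha⟩),
                  htrans e (List.mem_flatten.mpr ⟨b2, by simp [hb2], hc'⟩)]
              exact hrel a ha e hc'
            · intro b hb bc hbc a ha e he
              simp only [List.mem_singleton] at hbc
              subst hbc
              rw [htrans a (List.mem_flatten.mpr ⟨b, by simp [hb], ha⟩), h3a' e he]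
              have h1 : d.getD a.2 0 < d.getD prev.2 0 := hcross b hb cur (by simp) a ha prev hmem
              have h2 := h3a prev hmem
              omega)
          (by
            intro b hb a ha e he
            rcases List.mem_append.mp hb with hb' | hb'
            · rw [htrans a (List.mem_flatten.mpr ⟨b, by simp [hb'], ha⟩),
                  htrans e (List.mem_flatten.mpr ⟨b, by simp [hb'], he⟩)]
              exact h3c b (by simp [hb']) a ha e he
            · simp only [List.mem_singleton] at hb'
              subst hb'
              rw [h3a' a ha, h3a' e he])
          (by
            intro b hb a ha
            rcases List.mem_append.mp hb with hb' | hb'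
            · rw [htrans a (List.mem_flatten.mpr ⟨b, by simp [hb'], ha⟩)]
              exact h3d b (by simp [hb']) a ha
            · simp only [List.mem_singleton] at hb'
              subst hb'
              rw [h3a' a ha])
        refine ⟨hres.1.trans (by simp), hres.2.1, hres.2.2⟩

-- ===== VERDICT (by name: the statement is the Claim_ definition above) =====
theorem row_sort_basic_spec : Claim_equal_row_sort_basic := by
  intro centers _
  unfold Spec_row_sort_basic row_sort_basic row_sort_basic_alt
  by_cases hc : centers = []
  · simp [hc]
  · simp only [if_neg hc]
    have hsne : PySem.List.sorted centers (fun x => x.2) ≠ [] := by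
      rw [Ne, PySem.List.sorted_eq_nil_iff]; exact hc
    obtain ⟨c0, rest, hrest⟩ := List.exists_cons_of_ne_nil hsne
    have hspw : (PySem.List.sorted centers (fun x => x.2)).Pairwise (fun a b => a.2 ≤ b.2) :=
      PySem.List.sorted_pairwise centers (fun x => x.2)
    have hys : PySem.List.sorted (centers.map (fun c => c.2)) (fun y => y)
        = (PySem.List.sorted centers (fun x => x.2)).map (fun c => c.2) :=
      PySem.List.sorted_id_eq_of_perm_of_pairwise _ _
        ((PySem.List.sorted_perm centers (fun x => x.2) false).map _)
        (PySem.List.sorted_map_key_pairwise centers (fun x => x.2))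
    rw [hys, hrest]
    rw [hrest] at hspw
    have hperm_ys : ((c0 :: rest).map (fun c => c.2)).Perm (centers.map (fun c => c.2)) :=
      hrest ▸ (PySem.List.sorted_perm centers (fun x => x.2) false).map _
    have hylpw : (c0.2 :: rest.map (fun c => c.2)).Pairwise (fun a b => a ≤ b) := by
      have h : ((c0 :: rest).map (fun c => c.2)).Pairwise (fun a b => a ≤ b) :=
        List.pairwise_map.mpr hspw
      simpa using h
    have hget0 : PySem.List.pyGetD ((c0 :: rest).map (fun c => c.2)) 0 0 = c0.2 := by
      simp [PySem.List.pyGetD, PySem.List.pyGet?, PySem.List.pyIdx?]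
    obtain ⟨ini, lastY, hconc⟩ : ∃ L b, (c0 :: rest).map (fun c => c.2) = L ++ [b] := by
      rcases List.eq_nil_or_concat ((c0 :: rest).map (fun c => c.2)) with h | ⟨L, b, h⟩
      · simp at h
      · exact ⟨L, b, by simpa [List.concat_eq_append] using h⟩
    have hgetm1 : PySem.List.pyGetD ((c0 :: rest).map (fun c => c.2)) (-1) 0 = lastY := by
      rw [hconc]; exact PySem.List.pyGetD_neg_one_append_singleton ini lastY 0
    have hmin : (PySem.List.min? (centers.map (fun c => c.2)) (fun y => y)).getD 0 = c0.2 := by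
      cases hm : PySem.List.min? (centers.map (fun c => c.2)) (fun y => y) with
      | none =>
          rw [PySem.List.min?_eq_none_iff] at hm
          simp [hc] at hm
      | some m =>
          have hmm : m ∈ c0.2 :: rest.map (fun c => c.2) := by
            simpa using hperm_ys.mem_iff.mpr (PySem.List.min?_mem hm)
          have h1 : m ≤ c0.2 :=
            PySem.List.min?_isMin hm c0.2 (hperm_ys.mem_iff.mp (by simp))
          have h2 : c0.2 ≤ m := by
            rcases List.mem_cons.mp hmm with h | h
            · omega
            · exact List.rel_of_pairwise_cons hylpw h
          simp only [Option.getD_some]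
          omega
    have hmax : (PySem.List.max? (centers.map (fun c => c.2)) (fun y => y)).getD 0 = lastY := by
      cases hm : PySem.List.max? (centers.map (fun c => c.2)) (fun y => y) with
      | none =>
          rw [PySem.List.max?_eq_none_iff] at hm
          simp [hc] at hm
      | some m =>
          have hmm : m ∈ ini ++ [lastY] :=
            hconc ▸ hperm_ys.mem_iff.mpr (PySem.List.max?_mem hm)
          have hlmem : lastY ∈ centers.map (fun c => c.2) :=
            hperm_ys.mem_iff.mp (by rw [hconc]; simp)
          have h1 : lastY ≤ m := PySem.List.max?_isMax hm lastY hlmem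
          have h2 : m ≤ lastY := by
            have hpw2 : (ini ++ [lastY]).Pairwise (fun a b => a ≤ b) := by
              rw [← hconc]; simpa using hylpw
            rw [List.pairwise_append] at hpw2
            rcases List.mem_append.mp hmm with h | h
            · exact hpw2.2.2 m h lastY (by simp)
            · simp only [List.mem_singleton] at h; omega
          simp only [Option.getD_some]
          omega
    rw [hget0, hgetm1]
    have hth_eq : max 10 (PySem.Int.floordiv
          (3 * ((PySem.List.max? (centers.map (fun c => c.2)) (fun y => y)).getD 0
            - (PySem.List.min? (centers.map (fun c => c.2)) (fun y => y)).getD 0)) 100)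
        = max 10 (PySem.Int.floordiv (3 * (lastY - c0.2)) 100) := by
      rw [hmax, hmin]
    rw [hth_eq]
    set th := max 10 (PySem.Int.floordiv (3 * (lastY - c0.2)) 100) with hthdef
    have hthpos : (0 : Int) < th := lt_of_lt_of_le (by norm_num) (le_max_left _ _)
    have hzip : (((c0 :: rest).map (fun c => c.2)).zip ((((c0 :: rest).map (fun c => c.2))).drop 1))
        = ((c0 :: rest).zip rest).map (Prod.map (fun c => c.2) (fun c => c.2)) := by
      rw [show ((c0 :: rest).map (fun c => c.2)).drop 1 = rest.map (fun c => c.2) by simp]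
      exact List.zip_map
    rw [hzip, List.foldl_map]
    simp only [List.headD_cons, List.drop_succ_cons, List.drop_zero]
    have hjoint := pv_joint_inv th hthpos rest [] [c0] c0
      ((PySem.Dict.empty : PySem.Dict Int Int).insert c0.2 0) 0
      (by simpa using PySem.List.pyGetD_neg_one_append_singleton [] c0 (0,0))
      (by simp)
      (by intro e he; simp only [List.mem_singleton] at he; subst he; exact le_refl _)
      hspw.of_cons
      (fun e he => List.rel_of_pairwise_cons hspw he)
      (by simp)
      (by
        intro e he
        simp only [List.mem_singleton] at he
        subst he
        rw [PySem.Dict.getD_insert, if_pos rfl])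
      (by simp)
      (by
        intro b hb a ha e he
        simp only [List.nil_append, List.mem_singleton] at hb
        subst hb
        simp only [List.mem_singleton] at ha he
        subst ha; subst he; rfl)
      (by
        intro b hb a ha
        simp only [List.nil_append, List.mem_singleton] at hb
        subst hb
        simp only [List.mem_singleton] at ha
        subst ha
        rw [PySem.Dict.getD_insert, if_pos rfl])
    obtain ⟨hC1, hC2, hC3⟩ := hjoint
    have hC1' : ((rest.foldl (pvStepA th) ([], [c0])).1
        ++ [(rest.foldl (pvStepA th) ([], [c0])).2]).flatten = c0 :: rest := by
      simpa using hC1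
    rw [PySem.List.foldl_append_eq_flatMap, List.nil_append]
    refine pv_eq_of_perm_pairwise
      (pvR ((List.foldl (fun st p => pvStepB th st (p.1.2, p.2.2))
        (PySem.Dict.empty.insert c0.2 0, 0) ((c0 :: rest).zip rest)).1)) ?_ _ _ ?_ ?_ ?_
    · intro a b h1 h2
      rw [Prod.ext_iff]
      unfold pvR at h1 h2
      omega
    · refine ((pv_flatMap_sorted_perm _).trans ?_).trans
        ((PySem.List.sorted_perm _ _ false).trans
          (PySem.List.sorted2_perm centers (fun c => c.1) (fun c => c.2) false)).symm
      rw [hC1', ← hrest]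
      exact PySem.List.sorted_perm centers (fun x => x.2) false
    · rw [List.flatMap_def, List.pairwise_flatten]
      constructor
      · intro l hl
        obtain ⟨b, hb, rfl⟩ := List.mem_map.mp hl
        have hbsub : b.Sublist (c0 :: rest) := by
          rw [← hC1']
          exact List.sublist_flatten_of_mem hb
        have hbpw : b.Pairwise (fun a b => a.2 ≤ b.2) := hspw.sublist hbsub
        refine (pv_sorted_stable (fun x => x.1) (fun a b => a.2 ≤ b.2) b hbpw).imp_of_mem ?_
        intro a e ha he hr
        exact Or.inr ⟨hC3 b hb a ((PySem.List.mem_sorted _ _ _ _).mp ha)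
          e ((PySem.List.mem_sorted _ _ _ _).mp he), hr⟩
      · rw [List.pairwise_map]
        refine hC2.imp_of_mem ?_
        intro b1 b2 hb1 hb2 hrel x hx y hy
        exact Or.inl (hrel x ((PySem.List.mem_sorted _ _ _ _).mp hx)
          y ((PySem.List.mem_sorted _ _ _ _).mp hy))
    · have hxy : (PySem.List.sorted2 centers (fun c => c.1) (fun c => c.2)).Pairwise
          (fun a b => a.1 < b.1 ∨ (a.1 = b.1 ∧ a.2 ≤ b.2)) := by
        rw [pv_sorted2_eq_sorted_lex]
        refine (PySem.List.sorted_pairwise centers (fun a => toLex (a.1, a.2))).imp ?_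
        intro a b h
        simpa using Prod.Lex.le_iff.mp h
      exact pv_sorted_stable _ _ _ hxy
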